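-- pv_equiv track=rewrite | github.com/jursl/elkoi_py | text2sql.py | is_org_header
-- ===== SOURCE A (Python) =====
-- def is_org_header(line):
--     """Checks if 'line' is a header of org file.
--
--     >>> is_org_header("* Foo")
--     True
--     >>> is_org_header("*Foo")
--     False
--     >>> is_org_header('* Foo\\n')
--     True
--     """
--     try:
--         if line[0] != '*':
--             return False
--     except IndexError:
--         return False
--     for character in line[1:]:
--         if character == '*':
--             continue
--         elif character == ' ':
--             return True
--         else:
--             return False
-- ===== SOURCE B (Python) =====
-- def is_org_header(line):
--     rest = line.lstrip('*')
--     return len(rest) < len(line) and rest[:1] == ' '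
-- ===== Notes on version B (the rewrite author's own statement) =====
-- stated objective: simpler
-- what changed: Replaces the char-by-char loop with branches by a single lstrip('*') skip plus one comparison of the first remaining character, returning one boolean expression.
-- outside the precondition, e.g. on is_org_header('*'): A returns None, B returns False; on is_org_header('***'): A returns None, B returns False
import Mathlib
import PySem

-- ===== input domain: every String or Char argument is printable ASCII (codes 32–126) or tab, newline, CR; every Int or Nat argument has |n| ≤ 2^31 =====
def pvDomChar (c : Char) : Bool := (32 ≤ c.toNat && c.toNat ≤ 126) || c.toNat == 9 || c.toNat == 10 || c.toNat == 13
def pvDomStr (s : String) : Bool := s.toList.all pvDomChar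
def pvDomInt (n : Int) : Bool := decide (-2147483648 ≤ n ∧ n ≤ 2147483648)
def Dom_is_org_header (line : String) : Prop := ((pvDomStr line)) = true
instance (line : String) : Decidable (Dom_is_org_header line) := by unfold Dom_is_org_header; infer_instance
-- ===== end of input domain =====

-- B replaces A's char-by-char scan of line[1:] with one lstrip('*') skip plus a single
-- first-character comparison (objective: simpler).


-- ===== PORT A =====
-- scan of line[1:]: '*' -> continue, ' ' -> True, else False; Python falls off the end
-- (returns None) when line[1:] is all '*' -- those inputs are excluded by Pre_, the
-- [] default 'false' here is never reached inside Pre_.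
def pvLoopA : List Char → Bool
  | [] => false
  | c :: t => if c = '*' then pvLoopA t else if c = ' ' then true else false

def is_org_header (line : String) : Bool :=
  match PySem.Str.pyGet? line 0 with
  | none => false                 -- except IndexError: return False
  | some c => if c ≠ '*' then false else pvLoopA (line.toList.drop 1)  -- for character in line[1:]

-- ===== PORT B =====
def is_org_header_alt (line : String) : Bool :=
  let rest := line.toList.dropWhile (· == '*')   -- line.lstrip('*')
  decide (rest.length < line.toList.length) && decide (rest.take 1 = [' '])

-- ===== PRECONDITION & SPEC =====
-- Pre_ excludes non-empty lines consisting only of '*': there Python A falls off the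
-- end and returns None, not a bool; B returns False.
def Pre_is_org_header (line : String) : Prop :=
  ¬ (line.toList ≠ [] ∧ line.toList.all (· = '*') = true)
instance (line : String) : Decidable (Pre_is_org_header line) := by
  unfold Pre_is_org_header; infer_instance
def pvWitness_is_org_header : String := "* Foo"
def Spec_is_org_header (line : String) (out : Bool) : Prop := out = is_org_header_alt line
instance (line : String) (out : Bool) : Decidable (Spec_is_org_header line out) := by unfold Spec_is_org_header; infer_instance

-- ===== CLAIM (what is proved, stated in full; the proofs are below) =====
def Claim_equal_is_org_header : Prop := ∀ (line : String), Dom_is_org_header line → Pre_is_org_header line → Spec_is_org_header line (is_org_header line)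

-- ===== LEMMAS AND PROOFS =====
theorem pvLoopA_eq (t : List Char) :
    pvLoopA t = decide ((t.dropWhile (· == '*')).take 1 = [' ']) := by
  induction t with
  | nil => simp [pvLoopA]
  | cons c t ih =>
    by_cases h : c = '*'
    · simp [pvLoopA, h, ih]
    · by_cases h2 : c = ' ' <;> simp [pvLoopA, h, h2]

-- ===== VERDICT (by name: the statement is the Claim_ definition above) =====
theorem is_org_header_spec : Claim_equal_is_org_header := by
  intro line _ _
  unfold Spec_is_org_header is_org_header is_org_header_alt
  cases h : line.toList with
  | nil => simp [PySem.Str.pyGet?, PySem.Chars.pyGet?, PySem.List.pyGet?, h]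
  | cons c t =>
    by_cases hc : c = '*'
    · simp [PySem.Str.pyGet?, PySem.Chars.pyGet?, PySem.List.pyGet?, PySem.List.pyIdx?, h, hc,
        pvLoopA_eq]
      have := List.length_dropWhile_le (p := fun x : Char => x == '*') (l := t)
      omega
    · simp [PySem.Str.pyGet?, PySem.Chars.pyGet?, PySem.List.pyGet?, PySem.List.pyIdx?, h, hc]
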